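-- pv_equiv track=rewrite | github.com/tndkkim/codingtest_python | 백준/Gold/13549. 숨바꼭질 3/숨바꼭질 3.py | bfs
-- ===== SOURCE A (Python) =====
-- from collections import deque
--
-- def bfs(n, k):
--     q = deque([n])
--     dist = [-1] * 100001
--     dist[n] = 0
--
--     while q:
--         x = q.popleft()
--         if x == k:
--             return dist[x]
--
--         if 2*x <= 100000 and dist[2*x] == -1:
--             dist[2*x] = dist[x]
--             q.appendleft(2*x)
--
--         for nx in (x-1, x+1):
--             if 0 <= nx <= 100000 and dist[nx] == -1:
--                 dist[nx] = dist[x] + 1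
--                 q.append(nx)
-- ===== SOURCE B (Python) =====
-- def bfs(n, k):
--     # Plain growing-list FIFO BFS (no deque): each dequeued node's cost-0
--     # doubling chain is walked by an inner loop; answer read from the
--     # finished dist array instead of early-exiting.
--     dist = [-1] * 100001
--     dist[n] = 0
--     queue = [n]
--     i = 0
--     while i < len(queue):
--         x = queue[i]
--         i += 1
--         while True:
--             if 2 * x <= 100000 and dist[2 * x] == -1:
--                 dist[2 * x] = dist[x]
--                 nxt = 2 * x
--             else:
--                 nxt = None
--             for nx in (x - 1, x + 1):
--                 if 0 <= nx <= 100000 and dist[nx] == -1: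
--                     dist[nx] = dist[x] + 1
--                     queue.append(nx)
--             if nxt is None:
--                 break
--             x = nxt
--     return dist[k]
-- ===== Notes on version B (the rewrite author's own statement) =====
-- stated objective: alternative
-- what changed: Replaces the deque-based 0-1 BFS (appendleft for cost-0 doubling edges, early return on popping k) with a deque-free FIFO BFS over a growing list with an index pointer, whose cost-0 doubling chains are walked eagerly by an inner loop, and the answer is read from the completed dist array.
-- outside the precondition, e.g. on bfs(-5, -10): A returns 0, B raises IndexError; on bfs(0, 100001): A returns None, B raises IndexError
import Mathlib
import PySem

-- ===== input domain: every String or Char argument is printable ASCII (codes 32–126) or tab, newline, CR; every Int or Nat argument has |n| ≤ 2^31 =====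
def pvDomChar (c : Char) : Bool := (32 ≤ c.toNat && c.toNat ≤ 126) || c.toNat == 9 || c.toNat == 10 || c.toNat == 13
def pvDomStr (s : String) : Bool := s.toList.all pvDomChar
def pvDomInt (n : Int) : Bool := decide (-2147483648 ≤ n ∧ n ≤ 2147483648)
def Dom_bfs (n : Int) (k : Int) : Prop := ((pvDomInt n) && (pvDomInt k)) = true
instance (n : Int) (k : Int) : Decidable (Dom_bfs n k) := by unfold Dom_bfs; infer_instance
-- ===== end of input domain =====

-- B replaces A's deque-based 0-1 BFS by a deque-free FIFO BFS (growing list +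
-- index pointer) whose cost-0 doubling chains are walked by an inner loop,
-- reading the answer from the completed dist array (objective: alternative).

-- ===== PORT A =====
-- Python list subscript dist[i] / dist[i] = v; exact for the indices 0 ≤ i ≤ 100000
-- that occur on inputs satisfying Pre_bfs (Python's negative-index wraparound is
-- outside Pre_bfs).
def dget (d : Array Int) (i : Int) : Int := d.getD i.toNat (-1)
def dset (d : Array Int) (i : Int) (v : Int) : Array Int := d.setIfInBounds i.toNat v

-- A's deque, represented as a front/back pair of lists (popleft = head of front,
-- refilled from back.reverse; appendleft = cons onto front; append = cons onto back).
-- Fuel is a port artifact making the while-loop structural; 400000 is never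
-- exhausted on inputs satisfying Pre_bfs (proved below via the measure 3*U + pending).
def bfsLoop (k : Int) : Nat → List Int → List Int → Array Int → Int
  | 0, _, _, _ => -2
  | f+1, front0, back0, dist =>
    match (match front0 with
           | [] => ((back0.reverse : List Int), ([] : List Int))
           | x :: fr => (x :: fr, back0)) with
    | ([], _) => -1                 -- Python: while-loop ends, bfs returns None (outside Pre_bfs)
    | (x :: fr, back) =>
      if x = k then dget dist x
      else
        let s1 := if 2*x ≤ 100000 ∧ dget dist (2*x) = -1
                  then (2*x :: fr, dset dist (2*x) (dget dist x))
                  else (fr, dist)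
        let s2 := if 0 ≤ x-1 ∧ x-1 ≤ 100000 ∧ dget s1.2 (x-1) = -1
                  then ((x-1) :: back, dset s1.2 (x-1) (dget s1.2 x + 1))
                  else (back, s1.2)
        let s3 := if 0 ≤ x+1 ∧ x+1 ≤ 100000 ∧ dget s2.2 (x+1) = -1
                  then ((x+1) :: s2.1, dset s2.2 (x+1) (dget s2.2 x + 1))
                  else (s2.1, s2.2)
        bfsLoop k f s1.1 s3.1 s3.2

def bfs (n : Int) (k : Int) : Int :=
  bfsLoop k 400000 [n] [] (dset (Array.replicate 100001 (-1 : Int)) n (0 : Int))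

-- ===== PORT B =====
-- Inner while-loop of Source B: walk the cost-0 doubling chain from x, labelling
-- 2*x and appending the cost-1 neighbours x-1, x+1 to the growing queue.
def chainB : Nat → Int → Array Int → Array Int → Nat × Array Int × Array Int
  | 0, _, dist, queue => (0, dist, queue)
  | f+1, x, dist, queue =>
    let t1 := if 2*x ≤ 100000 ∧ dget dist (2*x) = -1
              then (dset dist (2*x) (dget dist x), true)
              else (dist, false)
    let t2 := if 0 ≤ x-1 ∧ x-1 ≤ 100000 ∧ dget t1.1 (x-1) = -1
              then (dset t1.1 (x-1) (dget t1.1 x + 1), queue.push (x-1))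
              else (t1.1, queue)
    let t3 := if 0 ≤ x+1 ∧ x+1 ≤ 100000 ∧ dget t2.1 (x+1) = -1
              then (dset t2.1 (x+1) (dget t2.1 x + 1), t2.2.push (x+1))
              else (t2.1, t2.2)
    if t1.2 then chainB f (2*x) t3.1 t3.2 else (f, t3.1, t3.2)

-- Outer while-loop of Source B: index pointer i into the growing queue.  Both pad
-- and fuel are fuel artifacts of the port (pad makes the recursion structural;
-- fuel is shared with chainB); neither is exhausted on inputs satisfying
-- Pre_bfs (proved below via the measure 3*U + pending).
def loopB (k : Int) : Nat → Nat → Nat → Array Int → Array Int → Int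
  | pad, fuel, i, queue, dist =>
    if _h : i < queue.size then
      match pad, fuel with
      | pad'+1, f+1 =>
        let r := chainB (f+1) queue[i] dist queue
        loopB k pad' r.1 (i+1) r.2.2 r.2.1
      | _, _ => -2
    else dget dist k

def bfs_alt (n : Int) (k : Int) : Int :=
  loopB k 400000 400000 0 #[n] (dset (Array.replicate 100001 (-1 : Int)) n (0 : Int))

-- ===== PRECONDITION & SPEC =====
-- Pre_bfs excludes out-of-range n or k: there A raises IndexError or returns
-- None instead of an int, except for accidental returns produced by Python's
-- negative-index wraparound (e.g. bfs(-5, -10) returns 0), where B raises IndexError.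
def Pre_bfs (n : Int) (k : Int) : Prop := 0 ≤ n ∧ n ≤ 100000 ∧ 0 ≤ k ∧ k ≤ 100000
instance (n : Int) (k : Int) : Decidable (Pre_bfs n k) := by unfold Pre_bfs; infer_instance
def pvWitness_bfs : Int × Int := (3, 7)

def Spec_bfs (n : Int) (k : Int) (out : Int) : Prop := out = bfs_alt n k
instance (n : Int) (k : Int) (out : Int) : Decidable (Spec_bfs n k out) := by unfold Spec_bfs; infer_instance

-- ===== CLAIM (what is proved, stated in full; the proofs are below) =====
def Claim_equal_bfs : Prop := ∀ (n : Int) (k : Int), Dom_bfs n k → Pre_bfs n k → Spec_bfs n k (bfs n k)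

-- ===== LEMMAS AND PROOFS =====

-- dget/dset toolbox
lemma dget_toNat (d : Array Int) (i j : Int) (h : i.toNat = j.toNat) : dget d i = dget d j := by
  unfold dget; rw [h]

lemma size_dset (d : Array Int) (i v : Int) : (dset d i v).size = d.size :=
  Array.size_setIfInBounds

lemma dget_dset_self (d : Array Int) (i v : Int) (h : i.toNat < d.size) :
    dget (dset d i v) i = v := by
  unfold dget dset
  simp [Array.getD_eq_getD_getElem?, h]

lemma dget_dset_ne (d : Array Int) (i j v : Int) (h : i.toNat ≠ j.toNat) :
    dget (dset d i v) j = dget d j := by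
  unfold dget dset
  simp [Array.getD_eq_getD_getElem?, h]

-- writes only happen at unlabelled cells, so labelled cells never change
lemma dget_write_fresh (d : Array Int) (y val j : Int) (hy : dget d y = -1)
    (hj : dget d j ≠ -1) : dget (dset d y val) j = dget d j := by
  apply dget_dset_ne
  intro h
  exact hj ((dget_toNat d j y h.symm).trans hy)

-- number of unlabelled cells
def U (d : Array Int) : Nat :=
  ((Finset.range 100001).filter (fun j => d.getD j (-1) = -1)).card

lemma U_le (d : Array Int) : U d ≤ 100001 := by
  unfold U
  exact le_trans (Finset.card_filter_le _ _) (by simp)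

lemma U_dset (d : Array Int) (i v : Int) (h0 : 0 ≤ i) (h1 : i ≤ 100000)
    (hsz : d.size = 100001) (hd : dget d i = -1) (hv : v ≠ -1) :
    U (dset d i v) + 1 = U d := by
  have hlt : i.toNat < d.size := by omega
  have hmem : i.toNat ∈ (Finset.range 100001).filter (fun j => d.getD j (-1) = -1) := by
    refine Finset.mem_filter.mpr ⟨Finset.mem_range.mpr (by omega), ?_⟩
    exact hd
  have hpti : (dset d i v).getD i.toNat (-1) = v := dget_dset_self d i v hlt
  have hpt : ∀ j : Nat, j ≠ i.toNat → (dset d i v).getD j (-1) = d.getD j (-1) := by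
    intro j hj
    unfold dset
    rw [Array.getD_eq_getD_getElem?, Array.getD_eq_getD_getElem?,
      Array.getElem?_setIfInBounds, if_neg (Ne.symm hj)]
  have hset : (Finset.range 100001).filter (fun j => (dset d i v).getD j (-1) = -1)
      = ((Finset.range 100001).filter (fun j => d.getD j (-1) = -1)).erase i.toNat := by
    ext j
    simp only [Finset.mem_filter, Finset.mem_erase, Finset.mem_range]
    constructor
    · rintro ⟨hj, hval⟩
      have hji : j ≠ i.toNat := by
        intro h
        rw [h, hpti] at hval
        exact hv hval
      rw [hpt j hji] at hval
      exact ⟨hji, hj, hval⟩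
    · rintro ⟨hji, hj, hval⟩
      rw [hpt j hji]
      exact ⟨hj, hval⟩
  have hpos : 0 < ((Finset.range 100001).filter (fun j => d.getD j (-1) = -1)).card :=
    Finset.card_pos.mpr ⟨_, hmem⟩
  unfold U
  rw [hset, Finset.card_erase_of_mem hmem]
  omega

def NNL (d : Array Int) : Prop :=
  ∀ j : Int, 0 ≤ j → j ≤ 100000 → dget d j = -1 ∨ 0 ≤ dget d j

-- one conditional write, summarized
def Step (d d' : Array Int) (c : Nat) : Prop :=
  d'.size = d.size ∧ U d' + c = U d ∧
  (∀ j, dget d j ≠ -1 → dget d' j = dget d j) ∧ (NNL d → NNL d')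

lemma Step.refl (d : Array Int) : Step d d 0 := by
  refine ⟨rfl, by omega, fun _ _ => rfl, fun h => h⟩

lemma Step.comp {d d' d'' : Array Int} {c c' : Nat} (h : Step d d' c) (h' : Step d' d'' c') :
    Step d d'' (c + c') := by
  obtain ⟨s1, u1, p1, n1⟩ := h
  obtain ⟨s2, u2, p2, n2⟩ := h'
  exact ⟨s2.trans s1, by omega, fun j hj => (p2 j (by rw [p1 j hj]; exact hj)).trans (p1 j hj),
    fun h => n2 (n1 h)⟩

lemma Step.write (d : Array Int) (y val : Int) (hsz : d.size = 100001)
    (h0 : 0 ≤ y) (h1 : y ≤ 100000) (hy : dget d y = -1) (hval : 0 ≤ val) :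
    Step d (dset d y val) 1 ∧ dget (dset d y val) y = val := by
  have hlt : y.toNat < d.size := by omega
  have hself := dget_dset_self d y val hlt
  refine ⟨⟨size_dset d y val, U_dset d y val h0 h1 hsz hy (by omega), ?_, ?_⟩, hself⟩
  · intro j hj
    exact dget_write_fresh d y val j hy hj
  · intro hn j hj0 hj1
    by_cases hc : y.toNat = j.toNat
    · right
      rw [← dget_toNat (dset d y val) y j hc, hself]
      exact hval
    · rw [dget_dset_ne d y j val hc]
      exact hn j hj0 hj1

-- the invariant carried through both loops
def QInv (dist queue : Array Int) (i : Nat) : Prop :=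
  dist.size = 100001 ∧ i ≤ queue.size ∧
  (∀ v ∈ queue.toList.drop i, 0 ≤ v ∧ v ≤ 100000 ∧ dget dist v ≠ -1) ∧
  NNL dist

lemma QInv_mono (dist queue : Array Int) (i : Nat) (h : QInv dist queue i) (hi : i < queue.size) :
    QInv dist queue (i+1) := by
  obtain ⟨h1, h2, h3, h4⟩ := h
  refine ⟨h1, by omega, ?_, h4⟩
  intro v hv
  apply h3
  have : queue.toList.drop (i+1) = (queue.toList.drop i).drop 1 := by
    rw [List.drop_drop]
  rw [this] at hv
  exact List.drop_subset _ _ hv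

-- ghost version of A's loop on the abstract queue front ++ back.reverse,
-- written stage-parallel to chainB
def bfsAbs (k : Int) : Nat → List Int → Array Int → Int
  | 0, _, _ => -2
  | _+1, [], _ => -1
  | f+1, x :: rest, dist =>
    if x = k then dget dist x
    else
      let t1 := if 2*x ≤ 100000 ∧ dget dist (2*x) = -1
                then (dset dist (2*x) (dget dist x), true)
                else (dist, false)
      let t2 := if 0 ≤ x-1 ∧ x-1 ≤ 100000 ∧ dget t1.1 (x-1) = -1
                then (dset t1.1 (x-1) (dget t1.1 x + 1), rest ++ [x-1])
                else (t1.1, rest)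
      let t3 := if 0 ≤ x+1 ∧ x+1 ≤ 100000 ∧ dget t2.1 (x+1) = -1
                then (dset t2.1 (x+1) (dget t2.1 x + 1), t2.2 ++ [x+1])
                else (t2.1, t2.2)
      bfsAbs k f (if t1.2 then 2*x :: t3.2 else t3.2) t3.1

-- A's pair-of-lists loop equals the ghost loop on the abstract queue
lemma pair_body (k : Int) (f : Nat)
    (REC : ∀ front back dist, bfsLoop k f front back dist
      = bfsAbs k f (front ++ back.reverse) dist) :
    ∀ (front back : List Int) (dist : Array Int),
      bfsLoop k (f+1) front back dist = bfsAbs k (f+1) (front ++ back.reverse) dist := by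
  have Hcons : ∀ x fr back dist, bfsLoop k (f+1) (x::fr) back dist
      = bfsAbs k (f+1) (x :: (fr ++ back.reverse)) dist := by
    intro x fr back dist
    simp only [bfsLoop, bfsAbs]
    by_cases hxk : x = k
    · simp [hxk]
    · simp only [if_neg hxk]
      split_ifs with g1 g2 g3 <;> simp_all [REC]
  intro front back dist
  cases front with
  | cons x fr => simpa using Hcons x fr back dist
  | nil =>
    cases hbr : back.reverse with
    | nil =>
      simp only [bfsLoop, hbr]
      simp [bfsAbs]
    | cons y fr' =>
      have hnorm : bfsLoop k (f+1) [] back dist = bfsLoop k (f+1) (y::fr') [] dist := by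
        simp only [bfsLoop, hbr]
      rw [hnorm, Hcons y fr' [] dist]
      simp

lemma pair_abs (k : Int) : ∀ (f : Nat) (front back : List Int) (dist : Array Int),
    bfsLoop k (f+1) front back dist = bfsAbs k (f+1) (front ++ back.reverse) dist := by
  intro f
  induction f with
  | zero => exact pair_body k 0 (fun front back dist => rfl)
  | succ f ih => exact pair_body k (f+1) ih

-- a useful fact: newly written cells are identifiable
lemma dget_new (d : Array Int) (y val kk : Int) (hkk : dget (dset d y val) kk ≠ dget d kk) :
    kk.toNat = y.toNat := by
  by_contra hne
  exact hkk (dget_dset_ne d y kk val (fun h => hne h.symm))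

lemma drop_push (q : Array Int) (v : Int) (j : Nat) (h : j ≤ q.size) :
    (q.push v).toList.drop j = q.toList.drop j ++ [v] := by
  rw [Array.toList_push, List.drop_append_of_le_length (by simpa using h)]

-- stage summaries: the doubling write and the two neighbour writes of one tick
lemma stageA (dist : Array Int) (x : Int) (hsz : dist.size = 100001) (hx0 : 0 ≤ x)
    (hxl : dget dist x ≠ -1) (hdx0 : 0 ≤ dget dist x) :
    ∃ dA advb cA,
      (if 2*x ≤ 100000 ∧ dget dist (2*x) = -1
        then (dset dist (2*x) (dget dist x), true) else (dist, false)) = (dA, advb) ∧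
      Step dist dA cA ∧ dget dA x = dget dist x ∧
      (advb = true → 0 ≤ 2*x ∧ 2*x ≤ 100000 ∧ dget dA (2*x) ≠ -1 ∧ cA = 1) ∧
      (advb = false → cA = 0) ∧
      (∀ kk : Int, dget dA kk ≠ -1 → dget dist kk ≠ -1 ∨ (advb = true ∧ kk.toNat = (2*x).toNat)) := by
  split_ifs with h
  · obtain ⟨SA, hself⟩ := Step.write dist (2*x) (dget dist x) hsz (by omega) h.1 h.2 hdx0
    refine ⟨_, true, 1, rfl, SA, SA.2.2.1 x hxl, ?_, by simp, ?_⟩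
    · intro _
      exact ⟨by omega, h.1, by rw [hself]; exact hxl, rfl⟩
    · intro kk hkk
      by_cases hc : dget (dset dist (2*x) (dget dist x)) kk = dget dist kk
      · left; rw [← hc]; exact hkk
      · right; exact ⟨rfl, dget_new dist (2*x) (dget dist x) kk hc⟩
  · exact ⟨dist, false, 0, rfl, Step.refl dist, rfl, by simp, fun _ => rfl,
      fun kk hkk => Or.inl hkk⟩

lemma stageN (d : Array Int) (q : Array Int) (x y : Int) (i : Nat) (hsz : d.size = 100001)
    (hxl : dget d x ≠ -1) (hdx0 : 0 ≤ dget d x) (hile : i + 1 ≤ q.size) :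
    ∃ d' q' c news,
      (∀ L : List Int,
        (if 0 ≤ y ∧ y ≤ 100000 ∧ dget d y = -1
          then (dset d y (dget d x + 1), L ++ [y]) else (d, L)) = (d', L ++ news)) ∧
      ((if 0 ≤ y ∧ y ≤ 100000 ∧ dget d y = -1
          then (dset d y (dget d x + 1), q.push y) else (d, q)) = (d', q')) ∧
      Step d d' c ∧ dget d' x = dget d x ∧
      q'.size = q.size + c ∧
      q'.toList.drop (i+1) = q.toList.drop (i+1) ++ news ∧
      (∀ v ∈ news, 0 ≤ v ∧ v ≤ 100000 ∧ dget d' v ≠ -1) ∧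
      (∀ kk : Int, 0 ≤ kk → dget d' kk ≠ -1 → dget d kk ≠ -1 ∨ kk ∈ news) := by
  split_ifs with h
  · obtain ⟨SN, hself⟩ := Step.write d y (dget d x + 1) hsz h.1 h.2.1 h.2.2 (by omega)
    refine ⟨_, _, 1, [y], fun L => rfl, rfl, SN, SN.2.2.1 x hxl, by simp [Array.size_push],
      drop_push q y (i+1) hile, ?_, ?_⟩
    · intro v hv
      rw [List.mem_singleton] at hv
      subst hv
      exact ⟨h.1, h.2.1, by rw [hself]; omega⟩
    · intro kk hkk0 hkk
      by_cases hc : dget (dset d y (dget d x + 1)) kk = dget d kk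
      · left; rw [← hc]; exact hkk
      · right
        have := dget_new d y (dget d x + 1) kk hc
        have : kk = y := by omega
        simp [this]
  · refine ⟨d, q, 0, [], fun L => by simp, by simp, Step.refl d, rfl, by omega, by simp,
      by simp, fun kk _ hkk => Or.inl hkk⟩

-- one tick: everything chainB and bfsAbs do when processing one node x
lemma tick_facts (x : Int) (dist queue : Array Int) (i : Nat)
    (hInv : QInv dist queue (i+1)) (hi : i < queue.size)
    (hx0 : 0 ≤ x) (hx1 : x ≤ 100000) (hxl : dget dist x ≠ -1) :
    ∃ (d3 q3 : Array Int) (adv : Bool) (c : Nat),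
      (∀ f : Nat, chainB (f+1) x dist queue = if adv then chainB f (2*x) d3 q3 else (f, d3, q3)) ∧
      (∀ (f : Nat) (kk : Int), x ≠ kk →
        bfsAbs kk (f+1) (x :: queue.toList.drop (i+1)) dist
          = bfsAbs kk f ((if adv then [2*x] else []) ++ q3.toList.drop (i+1)) d3) ∧
      QInv d3 q3 (i+1) ∧
      (∀ j, dget dist j ≠ -1 → dget d3 j = dget dist j) ∧
      (adv = true → 0 ≤ 2*x ∧ 2*x ≤ 100000 ∧ dget d3 (2*x) ≠ -1) ∧
      (U d3 + c = U dist) ∧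
      (if adv then 1 ≤ c ∧ q3.size + 1 = queue.size + c else q3.size = queue.size + c) ∧
      (∃ news, q3.toList.drop (i+1) = queue.toList.drop (i+1) ++ news) ∧
      (∀ kk : Int, 0 ≤ kk → dget d3 kk ≠ -1 →
        dget dist kk ≠ -1 ∨ kk ∈ q3.toList.drop (i+1) ∨ (adv = true ∧ kk = 2*x)) := by
  obtain ⟨hsz, hile, hpend, hnnl⟩ := hInv
  have hdx0 : 0 ≤ dget dist x := by
    rcases hnnl x hx0 hx1 with h | h
    · exact absurd h hxl
    · exact h
  obtain ⟨dA, advb, cA, hifA, SA, hAx, hadvT, hadvF, hidA⟩ := stageA dist x hsz hx0 hxl hdx0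
  have hszA : dA.size = 100001 := by rw [SA.1, hsz]
  have hxlA : dget dA x ≠ -1 := by rw [hAx]; exact hxl
  have hdx0A : 0 ≤ dget dA x := by rw [hAx]; exact hdx0
  obtain ⟨d1, q1, c1, news1, hifL1, hifQ1, S1, h1x, hq1sz, hq1drop, hnews1, hid1⟩ :=
    stageN dA queue x (x-1) i hszA hxlA hdx0A hile
  have hsz1 : d1.size = 100001 := by rw [S1.1, hszA]
  have hxl1 : dget d1 x ≠ -1 := by rw [h1x]; exact hxlA
  have hdx01 : 0 ≤ dget d1 x := by rw [h1x]; exact hdx0A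
  have hile1 : i + 1 ≤ q1.size := by omega
  obtain ⟨d2, q2, c2, news2, hifL2, hifQ2, S2, h2x, hq2sz, hq2drop, hnews2, hid2⟩ :=
    stageN d1 q1 x (x+1) i hsz1 hxl1 hdx01 hile1
  have SS : Step dist d2 (cA + c1 + c2) := Step.comp (Step.comp SA S1) S2
  have hdrop3 : q2.toList.drop (i+1) = queue.toList.drop (i+1) ++ (news1 ++ news2) := by
    rw [hq2drop, hq1drop, List.append_assoc]
  refine ⟨d2, q2, advb, cA + c1 + c2, ?_, ?_, ?_, ?_, ?_, ?_, ?_, ⟨news1 ++ news2, hdrop3⟩, ?_⟩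
  · -- chainB equation
    intro f
    simp only [chainB]
    rw [hifA]
    dsimp only
    rw [hifQ1]
    dsimp only
    rw [hifQ2]
  · -- bfsAbs equation
    intro f kk hxkk
    simp only [bfsAbs, if_neg hxkk]
    rw [hifA]
    dsimp only
    rw [hifL1 (queue.toList.drop (i+1))]
    dsimp only
    rw [hifL2 (queue.toList.drop (i+1) ++ news1)]
    dsimp only
    rw [hdrop3]
    cases advb <;> simp
  · -- QInv
    refine ⟨by rw [SS.1, hsz], by omega, ?_, SS.2.2.2 hnnl⟩
    intro v hv
    rw [hdrop3] at hv
    rcases List.mem_append.mp hv with hv | hv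
    · obtain ⟨h0, h1, hl⟩ := hpend v hv
      refine ⟨h0, h1, ?_⟩
      rw [SS.2.2.1 v hl]
      exact hl
    · rcases List.mem_append.mp hv with hv | hv
      · obtain ⟨h0, h1, hl⟩ := hnews1 v hv
        refine ⟨h0, h1, ?_⟩
        rw [S2.2.2.1 v hl]
        exact hl
      · exact hnews2 v hv
  · -- preservation
    intro j hj
    rw [SS.2.2.1 j hj]
  · -- advance node labelled
    intro hT
    obtain ⟨ha0, ha1, hal, _⟩ := hadvT hT
    refine ⟨ha0, ha1, ?_⟩
    rw [S2.2.2.1 (2*x) (by rw [S1.2.2.1 (2*x) hal]; exact hal), S1.2.2.1 (2*x) hal]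
    exact hal
  · -- U accounting
    exact SS.2.1
  · -- queue size accounting
    cases advb
    · have hc0 := hadvF rfl
      simp only [if_false, Bool.false_eq_true]
      omega
    · have hc1 := (hadvT rfl).2.2.2
      simp only [if_true]
      omega
  · -- newly labelled identification
    intro kk hkk0 hkk
    rcases hid2 kk hkk0 hkk with hkk1 | hmem
    · rcases hid1 kk hkk0 hkk1 with hkkA | hmem
      · rcases hidA kk hkkA with hkkd | ⟨hT, htn⟩
        · exact Or.inl hkkd
        · right; right
          exact ⟨hT, by omega⟩
      · right; left
        rw [hdrop3]
        simp [hmem]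
    · right; left
      rw [hdrop3]
      simp [hmem]

-- the whole chain from x: simulation of A's ghost loop across chainB, with
-- measure bookkeeping; the disjunction distinguishes "k not popped inside the
-- chain" from "k popped inside the chain" (A returns there)
lemma chainMAIN : ∀ (f : Nat) (x k : Int) (dist queue : Array Int) (i : Nat),
    QInv dist queue (i+1) → i < queue.size →
    0 ≤ x → x ≤ 100000 → dget dist x ≠ -1 →
    0 ≤ k → k ≤ 100000 →
    3 * U dist + (queue.size - i) < f →
    (chainB f x dist queue).1 < f ∧
    QInv (chainB f x dist queue).2.1 (chainB f x dist queue).2.2 (i+1) ∧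
    (∀ j, dget dist j ≠ -1 → dget (chainB f x dist queue).2.1 j = dget dist j) ∧
    3 * U (chainB f x dist queue).2.1 + ((chainB f x dist queue).2.2.size - (i+1))
        < (chainB f x dist queue).1 ∧
    ( (bfsAbs k f (x :: queue.toList.drop (i+1)) dist
         = bfsAbs k (chainB f x dist queue).1
             ((chainB f x dist queue).2.2.toList.drop (i+1)) (chainB f x dist queue).2.1
       ∧ ((dget dist k ≠ -1 → k ∈ x :: queue.toList.drop (i+1)) →
          (dget (chainB f x dist queue).2.1 k ≠ -1 →
             k ∈ (chainB f x dist queue).2.2.toList.drop (i+1))))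
      ∨ (dget (chainB f x dist queue).2.1 k ≠ -1 ∧
         bfsAbs k f (x :: queue.toList.drop (i+1)) dist = dget (chainB f x dist queue).2.1 k) ) := by
  intro f
  induction f using Nat.strong_induction_on with
  | _ f IH =>
    intro x k dist queue i hInv hi hx0 hx1 hxl hk0 hk1 hf
    match f, hf with
    | f₀+1, hf =>
    obtain ⟨d3, q3, adv, c, hchain, habs, hInv3, hpres3, hadv, hU, hsize, ⟨news, hnews⟩, hIk3⟩ :=
      tick_facts x dist queue i hInv hi hx0 hx1 hxl
    have hchainEq := hchain f₀
    have hi1 : i + 1 ≤ queue.size := hi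
    have hi31 : i + 1 ≤ q3.size := hInv3.2.1
    cases adv with
    | false =>
      simp only [Bool.false_eq_true, if_false] at hchainEq hsize
      rw [hchainEq]
      have hmeas : 3 * U d3 + (q3.size - (i+1)) < f₀ := by omega
      refine ⟨by omega, hInv3, hpres3, hmeas, ?_⟩
      by_cases hxk : x = k
      · right
        subst hxk
        refine ⟨by rw [hpres3 x hxl]; exact hxl, ?_⟩
        rw [hpres3 x hxl]
        simp [bfsAbs]
      · left
        constructor
        · have := habs f₀ k hxk
          simpa using this
        · intro hIk hlab3
          rcases hIk3 k hk0 hlab3 with hold | hmem | ⟨h, _⟩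
          · rcases List.mem_cons.mp (hIk hold) with h | h
            · exact absurd h.symm hxk
            · rw [hnews]
              exact List.mem_append_left _ h
          · exact hmem
          · simp at h
    | true =>
      simp only [if_true] at hchainEq hsize
      rw [hchainEq]
      obtain ⟨ha0, ha1, hal⟩ := hadv rfl
      have hi3 : i < q3.size := by omega
      have hmeas3 : 3 * U d3 + (q3.size - i) < f₀ := by omega
      obtain ⟨ih1, ih2, ih3, ih4, ih5⟩ :=
        IH f₀ (by omega) (2*x) k d3 q3 i hInv3 hi3 ha0 ha1 hal hk0 hk1 hmeas3
      have hpresC : ∀ j, dget dist j ≠ -1 →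
          dget (chainB f₀ (2*x) d3 q3).2.1 j = dget dist j := by
        intro j hj
        rw [ih3 j (by rw [hpres3 j hj]; exact hj), hpres3 j hj]
      refine ⟨by omega, ih2, hpresC, ih4, ?_⟩
      by_cases hxk : x = k
      · right
        subst hxk
        refine ⟨by rw [hpresC x hxl]; exact hxl, ?_⟩
        rw [hpresC x hxl]
        simp [bfsAbs]
      · have hstep := habs f₀ k hxk
        simp only [if_true] at hstep
        rcases ih5 with ⟨heq', hIk'⟩ | ⟨hne', heq'⟩
        · left
          constructor
          · rw [hstep, ← heq']
            rfl
          · intro hIk hlab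
            refine hIk' ?_ hlab
            intro hlab3
            rcases hIk3 k hk0 hlab3 with hold | hmem | ⟨_, hk2x⟩
            · rcases List.mem_cons.mp (hIk hold) with h | h
              · exact absurd h.symm hxk
              · right
                rw [hnews]
                exact List.mem_append_left _ h
            · exact List.mem_cons_of_mem _ hmem
            · rw [hk2x]
              exact List.mem_cons_self
        · right
          refine ⟨hne', ?_⟩
          rw [hstep, ← heq']
          rfl

-- once k is labelled, the rest of B's run returns exactly that label
lemma stabTerm : ∀ (f pad : Nat) (i : Nat) (queue dist : Array Int) (k : Int),
    QInv dist queue i → 0 ≤ k → k ≤ 100000 → dget dist k ≠ -1 →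
    3 * U dist + (queue.size - i) < f → f ≤ pad + 1 →
    loopB k pad f i queue dist = dget dist k := by
  intro f
  induction f using Nat.strong_induction_on with
  | _ f IH =>
    intro pad i queue dist k hInv hk0 hk1 hkl hf hpad
    match f, hf with
    | f₀+1, hf =>
    rw [loopB]
    by_cases h : i < queue.size
    · have hf1 : 1 ≤ f₀ := by omega
      match pad, (by omega : 1 ≤ pad) with
      | pad'+1, _ =>
      simp only [dif_pos h]
      have hts : i < queue.toList.length := by simpa using h
      have hdrop : queue.toList.drop i = queue[i] :: queue.toList.drop (i+1) := by
        rw [List.drop_eq_getElem_cons hts]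
        simp only [Array.getElem_toList]
      obtain ⟨hq0, hq1, hql⟩ := hInv.2.2.1 queue[i] (by rw [hdrop]; exact List.mem_cons_self)
      have hInv1 := QInv_mono dist queue i hInv h
      obtain ⟨hlt, hInv', hpres, hmeas, _⟩ :=
        chainMAIN (f₀+1) queue[i] k dist queue i hInv1 h hq0 hq1 hql hk0 hk1 hf
      rw [IH _ hlt pad' (i+1) _ _ k hInv' hk0 hk1 (by rw [hpres k hkl]; exact hkl) hmeas
          (by omega),
        hpres k hkl]
    · simp only [dif_neg h]

-- main simulation: A's ghost loop on the pending suffix equals B's loop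
lemma SIM : ∀ (f pad : Nat) (i : Nat) (queue dist : Array Int) (k : Int),
    QInv dist queue i → 0 ≤ k → k ≤ 100000 →
    (dget dist k ≠ -1 → k ∈ queue.toList.drop i) →
    3 * U dist + (queue.size - i) < f → f ≤ pad + 1 →
    bfsAbs k f (queue.toList.drop i) dist = loopB k pad f i queue dist := by
  intro f
  induction f using Nat.strong_induction_on with
  | _ f IH =>
    intro pad i queue dist k hInv hk0 hk1 hIk hf hpad
    match f, hf with
    | f₀+1, hf =>
    rw [loopB]
    by_cases h : i < queue.size
    · have hf1 : 1 ≤ f₀ := by omega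
      match pad, (by omega : 1 ≤ pad) with
      | pad'+1, _ =>
      simp only [dif_pos h]
      have hts : i < queue.toList.length := by simpa using h
      have hdrop : queue.toList.drop i = queue[i] :: queue.toList.drop (i+1) := by
        rw [List.drop_eq_getElem_cons hts]
        simp only [Array.getElem_toList]
      obtain ⟨hq0, hq1, hql⟩ := hInv.2.2.1 queue[i] (by rw [hdrop]; exact List.mem_cons_self)
      have hInv1 := QInv_mono dist queue i hInv h
      obtain ⟨hlt, hInv', hpres, hmeas, hdisj⟩ :=
        chainMAIN (f₀+1) queue[i] k dist queue i hInv1 h hq0 hq1 hql hk0 hk1 hf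
      rw [hdrop]
      rcases hdisj with ⟨heq, hIk'⟩ | ⟨hne, heq⟩
      · rw [heq]
        exact IH _ hlt pad' (i+1) _ _ k hInv' hk0 hk1
          (hIk' (fun hl => by rw [← hdrop]; exact hIk hl)) hmeas (by omega)
      · rw [heq, stabTerm _ pad' (i+1) _ _ k hInv' hk0 hk1 hne hmeas (by omega)]
    · simp only [dif_neg h]
      have hempty : queue.toList.drop i = [] := by
        apply List.drop_eq_nil_of_le
        simpa using not_lt.mp h
      have hkl : dget dist k = -1 := by
        by_contra hc
        have := hIk hc
        rw [hempty] at this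
        simp at this
      rw [hempty, hkl]
      simp [bfsAbs]

-- ===== VERDICT (by name: the statement is the Claim_ definition above) =====
theorem bfs_spec : Claim_equal_bfs := by
  intro n k _ hpre
  obtain ⟨hn0, hn1, hk0, hk1⟩ := hpre
  unfold Spec_bfs bfs bfs_alt
  set dist0 := dset (Array.replicate 100001 (-1 : Int)) n (0 : Int) with hdist0
  have hsz0 : dist0.size = 100001 := by
    rw [hdist0, size_dset, Array.size_replicate]
  have hgetn : dget dist0 n = 0 := by
    rw [hdist0]
    exact dget_dset_self _ _ _ (by rw [Array.size_replicate]; omega)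
  have hinit : ∀ j : Int, j.toNat ≠ n.toNat → dget dist0 j = -1 := by
    intro j hj
    rw [hdist0, dget_dset_ne _ _ _ _ (fun h => hj h.symm)]
    unfold dget
    rw [Array.getD_eq_getD_getElem?, Array.getElem?_replicate]
    by_cases hlt : j.toNat < 100001 <;> simp [hlt]
  have hQ : QInv dist0 #[n] 0 := by
    refine ⟨hsz0, by simp, ?_, ?_⟩
    · intro v hv
      simp at hv
      subst hv
      exact ⟨hn0, hn1, by rw [hgetn]; omega⟩
    · intro j _ _
      by_cases hc : j.toNat = n.toNat
      · right
        rw [dget_toNat dist0 j n hc, hgetn]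
      · left
        exact hinit j hc
  have hIk : dget dist0 k ≠ -1 → k ∈ (#[n] : Array Int).toList.drop 0 := by
    intro hkl
    have hkn : k.toNat = n.toNat := by
      by_contra hc
      exact hkl (hinit k hc)
    have : k = n := by omega
    simp [this]
  have hUb := U_le dist0
  have hmeas : 3 * U dist0 + ((#[n] : Array Int).size - 0) < 400000 := by
    simp only [List.size_toArray, List.length_cons, List.length_nil]
    omega
  have h400 : (400000 : Nat) = 399999 + 1 := by norm_num
  calc bfsLoop k 400000 [n] [] dist0
      = bfsAbs k 400000 ([n] ++ ([] : List Int).reverse) dist0 := by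
        rw [h400]; exact pair_abs k 399999 [n] [] dist0
    _ = bfsAbs k 400000 ((#[n] : Array Int).toList.drop 0) dist0 := by simp
    _ = loopB k 400000 400000 0 #[n] dist0 :=
        SIM 400000 400000 0 #[n] dist0 k hQ hk0 hk1 hIk hmeas (by omega)
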